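-- pv_equiv track=rewrite | github.com/ParaHuang/YunPei | pythonProject1/Assignment1_1485192.py | Q29
-- ===== SOURCE A (Python) =====
-- def Q29(nums, k):
--     """
--     Compute sums of all contiguous windows of length k.
--
--     Parameters
--     ----------
--     nums : list[int or float]
--         Input numbers.
--     k : int
--         Window size.
--
--     Returns
--     -------
--     list[int or float]
--         Window sums, or empty list if k invalid.
--     """
--     if nums == [] or k > len(nums):
--         return []
--     ans2 = []
--     for item in range(len(nums) - k + 1):
--         others = nums[item: item + k]
--         ans2.append(sum(others))
--     return ans2
-- ===== SOURCE B (Python) =====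
-- def Q29(nums, k):
--     """Window sums via a prefix-sum array: O(n) instead of O(n*k)."""
--     if nums == [] or k > len(nums):
--         return []
--     pref = [0]
--     for x in nums:
--         pref.append(pref[-1] + x)
--     return [pref[i + k] - pref[i] for i in range(len(nums) - k + 1)]
-- ===== Notes on version B (the rewrite author's own statement) =====
-- stated objective: faster
-- what changed: B builds a prefix-sum array once and emits each window sum as a difference of two prefix values, instead of re-slicing and re-summing k elements per window.
-- outside the precondition, e.g. on Q29([1, 2, 3], -1): A returns [3, 0, 0, 0, 0], B raises IndexError
import Mathlib
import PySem

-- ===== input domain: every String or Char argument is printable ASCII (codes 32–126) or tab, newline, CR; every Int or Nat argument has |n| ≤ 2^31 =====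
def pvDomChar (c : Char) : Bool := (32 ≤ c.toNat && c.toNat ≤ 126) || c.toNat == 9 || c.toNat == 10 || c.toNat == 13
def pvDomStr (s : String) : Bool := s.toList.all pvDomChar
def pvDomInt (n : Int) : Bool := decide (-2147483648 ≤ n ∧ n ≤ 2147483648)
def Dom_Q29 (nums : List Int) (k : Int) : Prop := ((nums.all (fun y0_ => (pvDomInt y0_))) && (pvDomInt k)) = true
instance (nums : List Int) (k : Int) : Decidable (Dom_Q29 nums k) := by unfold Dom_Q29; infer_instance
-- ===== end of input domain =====

-- B replaces the O(n*k) per-window slice-and-sum with a prefix-sum array, giving each window sum in O(1).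

-- ===== PORT A =====
def Q29 (nums : List Int) (k : Int) : List Int :=
  if nums = [] ∨ (nums.length : Int) < k then []
  else
    (PySem.List.pyRange 0 ((nums.length : Int) - k + 1) 1).foldl
      (fun ans2 item =>
        ans2 ++ [(PySem.List.slice nums (some item) (some (item + k))).sum]) []

-- ===== PORT B =====
def Q29_alt (nums : List Int) (k : Int) : List Int :=
  if nums = [] ∨ (nums.length : Int) < k then []
  else
    let pref := nums.foldl (fun p x => p ++ [PySem.List.pyGetD p (-1) 0 + x]) ([0] : List Int)
    (PySem.List.pyRange 0 ((nums.length : Int) - k + 1) 1).map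
      (fun i => PySem.List.pyGetD pref (i + k) 0 - PySem.List.pyGetD pref i 0)

-- ===== PRECONDITION & SPEC =====
-- Pre_ excludes negative window sizes k (with nums nonempty): there A's value is an accident of
-- Python's negative-index slicing, and B's prefix-sum lookup raises IndexError.
def Pre_Q29 (nums : List Int) (k : Int) : Prop := 0 ≤ k ∨ nums = []
instance (nums : List Int) (k : Int) : Decidable (Pre_Q29 nums k) := by unfold Pre_Q29; infer_instance
def pvWitness_Q29 : List Int × Int := ([1, 2, 3, 4], 2)

def Spec_Q29 (nums : List Int) (k : Int) (out : List Int) : Prop := out = Q29_alt nums k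
instance (nums : List Int) (k : Int) (out : List Int) : Decidable (Spec_Q29 nums k out) := by unfold Spec_Q29; infer_instance

-- ===== CLAIM (what is proved, stated in full; the proofs are below) =====
def Claim_equal_Q29 : Prop := ∀ (nums : List Int) (k : Int), Dom_Q29 nums k → Pre_Q29 nums k → Spec_Q29 nums k (Q29 nums k)

-- ===== LEMMAS AND PROOFS =====

-- running prefix sums of a list starting from s (the values B's loop appends)
def scanSums (s : Int) : List Int → List Int
  | [] => []
  | x :: xs => (s + x) :: scanSums (s + x) xs

-- B's pref-building loop unrolled: it appends the running sums after any nonempty accumulator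
theorem foldl_pref (nums : List Int) : ∀ (p : List Int) (s : Int), p.getLast? = some s →
    nums.foldl (fun p x => p ++ [PySem.List.pyGetD p (-1) 0 + x]) p = p ++ scanSums s nums := by
  induction nums with
  | nil => intro p s _; simp [scanSums]
  | cons x xs ih =>
    intro p s hs
    have hne : p ≠ [] := by rintro rfl; simp at hs
    have hlast : PySem.List.pyGetD p (-1) 0 = s := by
      rw [PySem.List.pyGetD_neg_one p 0 hne]
      exact Option.some.inj ((List.getLast?_eq_some_getLast hne).symm.trans hs)
    simp only [List.foldl_cons, hlast]
    rw [ih (p ++ [s + x]) (s + x) (by simp)]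
    simp [scanSums]

-- the j-th prefix value is s plus the sum of the first j elements
theorem getD_scanSums (l : List Int) : ∀ (s : Int) (j : Nat), j ≤ l.length →
    (s :: scanSums s l).getD j 0 = s + (l.take j).sum := by
  induction l with
  | nil =>
    intro s j hj
    have hj0 : j = 0 := by simpa using hj
    subst hj0; simp
  | cons x xs ih =>
    intro s j hj
    cases j with
    | zero => simp
    | succ j =>
      have := ih (s + x) j (by simpa using hj)
      simp only [scanSums, List.getD_cons_succ, List.take_succ_cons, List.sum_cons]
      rw [this]; ring

-- ===== VERDICT (by name: the statement is the Claim_ definition above) =====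
theorem Q29_spec : Claim_equal_Q29 := by
  intro nums k _ hpre
  unfold Spec_Q29 Q29 Q29_alt
  by_cases hc : nums = [] ∨ (nums.length : Int) < k
  · simp [hc]
  · push Not at hc
    obtain ⟨hne, hk⟩ := hc
    have hk0 : 0 ≤ k := by
      rcases hpre with h | h
      · exact h
      · exact absurd h hne
    rw [if_neg (by push Not; exact ⟨hne, hk⟩), if_neg (by push Not; exact ⟨hne, hk⟩)]
    rw [foldl_pref nums [0] 0 (by simp)]
    rw [PySem.List.foldl_append_singleton_eq_map]
    refine List.map_congr_left ?_
    intro i hi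
    rw [PySem.List.mem_pyRange_one] at hi
    obtain ⟨hi0, hilt⟩ := hi
    -- bounds
    have hik : i + k ≤ (nums.length : Int) := by omega
    have hitn : i.toNat ≤ nums.length := by omega
    have hikn : (i + k).toNat ≤ nums.length := by omega
    -- rewrite the two pyGetD lookups as getD on the prefix list
    have hgi : PySem.List.pyGetD ([0] ++ scanSums 0 nums) i 0
        = (0 :: scanSums 0 nums).getD i.toNat 0 := by
      have : i = ((i.toNat : Nat) : Int) := by omega
      rw [this, PySem.List.pyGetD_natCast]; rfl
    have hgik : PySem.List.pyGetD ([0] ++ scanSums 0 nums) (i + k) 0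
        = (0 :: scanSums 0 nums).getD (i + k).toNat 0 := by
      have : i + k = (((i + k).toNat : Nat) : Int) := by omega
      rw [this, PySem.List.pyGetD_natCast]; rfl
    rw [hgi, hgik, getD_scanSums nums 0 i.toNat hitn, getD_scanSums nums 0 (i + k).toNat hikn]
    -- slice = drop-then-take, and its sum is a difference of prefix sums
    rw [PySem.List.slice_toNat nums hi0 (by omega)]
    have hsplit : (i + k).toNat = i.toNat + ((i + k).toNat - i.toNat) := by omega
    have harith : i.toNat + ((i + k).toNat - i.toNat) - i.toNat = (i + k).toNat - i.toNat := by
      omega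
    rw [hsplit, List.take_add, List.sum_append, harith]
    ring
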